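-- pv_equiv track=rewrite | github.com/l33tdawg/aether | core/foundry_poc_generator.py | _validate_solidity_syntax
-- ===== SOURCE A (Python) =====
-- def _validate_solidity_syntax(code: str) -> bool:
--     # Basic syntax validation for generated Solidity code.
--     try:
--         # Check for basic syntax issues
--         if not code.strip():
--             return False
--
--         # Check for balanced braces
--         brace_count = 0
--         paren_count = 0
--         bracket_count = 0
--
--         for char in code:
--             if char == '{':
--                 brace_count += 1
--             elif char == '}':
--                 brace_count -= 1
--             elif char == '(':
--                 paren_count += 1
--             elif char == ')':
--                 paren_count -= 1
--             elif char == '[':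
--                 bracket_count += 1
--             elif char == ']':
--                 bracket_count -= 1
--
--             # Early termination if unbalanced
--             if brace_count < 0 or paren_count < 0 or bracket_count < 0:
--                 return False
--
--         # Check for balanced braces at the end
--         if brace_count != 0 or paren_count != 0 or bracket_count != 0:
--             return False
--
--         # Check for required pragma and license
--         if 'pragma solidity' not in code:
--             return False
--
--         # Check for contract declaration
--         if 'contract ' not in code and 'interface ' not in code and 'library ' not in code:
--             return False
--
--         return True
--
--     except Exception:
--         return False
-- ===== SOURCE B (Python) =====
-- def _balanced(code, open_ch, close_ch):
--     depth = 0
--     for ch in code: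
--         if ch == open_ch:
--             depth += 1
--         elif ch == close_ch:
--             depth -= 1
--             if depth < 0:
--                 return False
--     return depth == 0
--
--
-- def _validate_solidity_syntax(code: str) -> bool:
--     if not code.strip():
--         return False
--     if not all(_balanced(code, o, c) for o, c in (('{', '}'), ('(', ')'), ('[', ']'))):
--         return False
--     if 'pragma solidity' not in code:
--         return False
--     return 'contract ' in code or 'interface ' in code or 'library ' in code
-- ===== Notes on version B (the rewrite author's own statement) =====
-- stated objective: simpler
-- what changed: Replaces A's single interleaved scan with three mutable counters and early-return checks by a small reusable helper scanning once per bracket pair (counter goes negative -> False, nonzero at end -> False), combined with all(); keyword substring checks are kept.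
import Mathlib
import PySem

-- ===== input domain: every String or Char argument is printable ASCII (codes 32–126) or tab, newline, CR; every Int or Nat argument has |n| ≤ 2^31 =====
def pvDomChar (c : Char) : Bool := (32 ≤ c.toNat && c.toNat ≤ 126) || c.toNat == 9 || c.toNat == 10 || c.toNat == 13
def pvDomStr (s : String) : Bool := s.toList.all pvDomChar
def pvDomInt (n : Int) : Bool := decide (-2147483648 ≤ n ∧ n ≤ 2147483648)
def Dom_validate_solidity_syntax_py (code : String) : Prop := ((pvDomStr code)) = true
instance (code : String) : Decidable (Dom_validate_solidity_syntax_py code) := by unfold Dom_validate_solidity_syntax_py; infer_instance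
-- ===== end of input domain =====

-- B replaces A's single interleaved three-counter scan by a reusable per-pair balance
-- helper applied to each bracket pair (objective: simpler decomposition).

-- ===== PORT A =====
-- A's for-loop: one pass updating the three counters via the if/elif chain with the
-- in-loop early `return False` on any negative counter, plus the post-loop zero check.
def pvLoopA : List Char → Int → Int → Int → Bool
  | [], b, p, k => b == 0 && p == 0 && k == 0
  | c :: rest, b, p, k =>
    let s :=
      if c = '{' then (b + 1, p, k)
      else if c = '}' then (b - 1, p, k)
      else if c = '(' then (b, p + 1, k)
      else if c = ')' then (b, p - 1, k)
      else if c = '[' then (b, p, k + 1)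
      else if c = ']' then (b, p, k - 1)
      else (b, p, k)
    if s.1 < 0 ∨ s.2.1 < 0 ∨ s.2.2 < 0 then false
    else pvLoopA rest s.1 s.2.1 s.2.2

def validate_solidity_syntax_py (code : String) : Bool :=
  if (PySem.Str.strip code).toList = [] then false
  else if ¬ pvLoopA code.toList 0 0 0 then false
  else if ¬ PySem.Str.isIn "pragma solidity" code then false
  else if ¬ PySem.Str.isIn "contract " code ∧ ¬ PySem.Str.isIn "interface " code
          ∧ ¬ PySem.Str.isIn "library " code then false
  else true

-- ===== PORT B =====
-- B's helper: one scan per bracket pair; depth decrement below zero fails immediately,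
-- nonzero final depth fails at the end.
def pvBalanced (o c : Char) : List Char → Int → Bool
  | [], depth => depth == 0
  | ch :: rest, depth =>
    if ch = o then pvBalanced o c rest (depth + 1)
    else if ch = c then
      if depth - 1 < 0 then false else pvBalanced o c rest (depth - 1)
    else pvBalanced o c rest depth

def validate_solidity_syntax_py_alt (code : String) : Bool :=
  if (PySem.Str.strip code).toList = [] then false
  else if ¬ (pvBalanced '{' '}' code.toList 0 && pvBalanced '(' ')' code.toList 0
             && pvBalanced '[' ']' code.toList 0) then false
  else if ¬ PySem.Str.isIn "pragma solidity" code then false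
  else PySem.Str.isIn "contract " code || PySem.Str.isIn "interface " code
       || PySem.Str.isIn "library " code

-- ===== PRECONDITION & SPEC =====
def Spec_validate_solidity_syntax_py (code : String) (out : Bool) : Prop := out = validate_solidity_syntax_py_alt code
instance (code : String) (out : Bool) : Decidable (Spec_validate_solidity_syntax_py code out) := by unfold Spec_validate_solidity_syntax_py; infer_instance

-- ===== CLAIM (what is proved, stated in full; the proofs are below) =====
def Claim_equal_validate_solidity_syntax_py : Prop := ∀ (code : String), Dom_validate_solidity_syntax_py code → Spec_validate_solidity_syntax_py code (validate_solidity_syntax_py code)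

-- ===== LEMMAS AND PROOFS =====

lemma pvLoopA_eq_balanced (cs : List Char) : ∀ b p k : Int, 0 ≤ b → 0 ≤ p → 0 ≤ k →
    pvLoopA cs b p k =
      (pvBalanced '{' '}' cs b && pvBalanced '(' ')' cs p && pvBalanced '[' ']' cs k) := by
  induction cs with
  | nil => intro b p k _ _ _; simp [pvLoopA, pvBalanced]
  | cons c rest ih =>
    intro b p k hb hp hk
    by_cases h1 : c = '{'
    · subst h1
      simp only [pvLoopA, pvBalanced, Char.reduceEq, reduceIte]
      rw [if_neg (by omega), ih (b+1) p k (by omega) hp hk]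
    · by_cases h2 : c = '}'
      · subst h2
        simp only [pvLoopA, pvBalanced, Char.reduceEq, reduceIte]
        by_cases hneg : b - 1 < 0
        · rw [if_pos (by omega), if_pos hneg]; simp
        · rw [if_neg (by omega), if_neg hneg, ih (b-1) p k (by omega) hp hk]
      · by_cases h3 : c = '('
        · subst h3
          simp only [pvLoopA, pvBalanced, Char.reduceEq, reduceIte]
          rw [if_neg (by omega), ih b (p+1) k hb (by omega) hk]
        · by_cases h4 : c = ')'
          · subst h4
            simp only [pvLoopA, pvBalanced, Char.reduceEq, reduceIte]
            by_cases hneg : p - 1 < 0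
            · rw [if_pos (by omega), if_pos hneg]; simp
            · rw [if_neg (by omega), if_neg hneg, ih b (p-1) k hb (by omega) hk]
          · by_cases h5 : c = '['
            · subst h5
              simp only [pvLoopA, pvBalanced, Char.reduceEq, reduceIte]
              rw [if_neg (by omega), ih b p (k+1) hb hp (by omega)]
            · by_cases h6 : c = ']'
              · subst h6
                simp only [pvLoopA, pvBalanced, Char.reduceEq, reduceIte]
                by_cases hneg : k - 1 < 0
                · rw [if_pos (by omega), if_pos hneg]; simp
                · rw [if_neg (by omega), if_neg hneg, ih b p (k-1) hb hp (by omega)]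
              · simp only [pvLoopA, pvBalanced, if_neg h1, if_neg h2, if_neg h3,
                  if_neg h4, if_neg h5, if_neg h6]
                rw [if_neg (by omega), ih b p k hb hp hk]

-- ===== VERDICT (by name: the statement is the Claim_ definition above) =====
theorem validate_solidity_syntax_py_spec : Claim_equal_validate_solidity_syntax_py := by
  intro code _
  unfold Spec_validate_solidity_syntax_py validate_solidity_syntax_py validate_solidity_syntax_py_alt
  rw [pvLoopA_eq_balanced code.toList 0 0 0 le_rfl le_rfl le_rfl]
  simp [Bool.or_assoc]
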